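-- pv_equiv track=rewrite | github.com/Mariochiappini1996/Vault_University-LT | Python/Funzione Init lista e rem none (Esercizio per casa lezione 10 11).py | rem_none
-- ===== SOURCE A (Python) =====
-- def rem_none( a ):
--     i = 0
--     while i < len(a):
--         if a[i] == None:
--             del(a[i])
--         else:
--             i += 1
--     return a
-- ===== SOURCE B (Python) =====
-- def rem_none(a):
--     w = 0
--     for i in range(len(a)):
--         if a[i] != None:
--             a[w] = a[i]
--             w += 1
--     del a[w:]
--     return a
-- ===== Notes on version B (the rewrite author's own statement) =====
-- stated objective: faster
-- what changed: Replaces the while loop with repeated mid-list del(a[i]) by a single-pass two-pointer compaction (write cursor plus one tail truncation), still mutating the list in place.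
import Mathlib
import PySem

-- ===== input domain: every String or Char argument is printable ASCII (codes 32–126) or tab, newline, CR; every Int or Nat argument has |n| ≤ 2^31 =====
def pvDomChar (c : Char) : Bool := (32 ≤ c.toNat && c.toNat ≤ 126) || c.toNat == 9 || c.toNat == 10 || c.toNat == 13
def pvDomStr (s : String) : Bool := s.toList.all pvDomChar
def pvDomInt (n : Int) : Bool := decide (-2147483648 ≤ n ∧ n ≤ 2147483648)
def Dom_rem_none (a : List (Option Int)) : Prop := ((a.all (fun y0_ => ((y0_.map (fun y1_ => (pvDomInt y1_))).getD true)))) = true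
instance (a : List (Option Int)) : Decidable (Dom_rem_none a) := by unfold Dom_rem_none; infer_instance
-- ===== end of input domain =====

-- B: one-pass two-pointer compaction (O(n)) instead of A's repeated mid-list deletions (O(n^2));
-- both mutate the Python list in place, the theorems are about the returned value.

-- ===== PORT A =====
-- A's while loop scans from the left and deletes each None where it stands; the
-- suffix beyond position i is untouched until i reaches it, so the loop is the
-- structural recursion: drop a None head and rescan, keep a non-None head and advance.
def rem_none (a : List (Option Int)) : List Int :=
  match a with
  | [] => []
  | none :: t => rem_none t
  | some x :: t => x :: rem_none t

-- ===== PORT B =====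
-- B walks the read index forward once, appending each surviving element at the
-- write cursor (modelled as the accumulated prefix); the final truncation leaves
-- exactly the accumulator.
def rem_none_alt (a : List (Option Int)) : List Int :=
  a.foldl (fun w x => match x with | some v => w ++ [v] | none => w) []

-- ===== PRECONDITION & SPEC =====
def Spec_rem_none (a : List (Option Int)) (out : List Int) : Prop := out = rem_none_alt a
instance (a : List (Option Int)) (out : List Int) : Decidable (Spec_rem_none a out) := by unfold Spec_rem_none; infer_instance

-- ===== CLAIM (what is proved, stated in full; the proofs are below) =====
def Claim_equal_rem_none : Prop := ∀ (a : List (Option Int)), Dom_rem_none a → Spec_rem_none a (rem_none a)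

-- ===== LEMMAS AND PROOFS =====
theorem rem_none_alt_acc (a : List (Option Int)) (w : List Int) :
    a.foldl (fun w x => match x with | some v => w ++ [v] | none => w) w = w ++ rem_none a := by
  induction a generalizing w with
  | nil => simp [rem_none]
  | cons h t ih =>
    cases h with
    | none => simp [List.foldl, rem_none, ih]
    | some v => simp [List.foldl, rem_none, ih]

-- ===== VERDICT (by name: the statement is the Claim_ definition above) =====
theorem rem_none_spec : Claim_equal_rem_none := by
  intro a _
  unfold Spec_rem_none rem_none_alt
  simp [rem_none_alt_acc]
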